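-- pv_equiv track=rewrite | github.com/unlearning/python-algorithm | egg/day 8/외계어 사전.py | solution
-- ===== SOURCE A (Python) =====
-- def solution(spell, dic):
--     answer = 2
--     count = 0
--
--     for i in dic:
--         for j in spell:
--             if j in i:
--                 count += 1
--         if count == len(spell):
--             answer = 1
--         count = 0
--
--     return answer
-- ===== SOURCE B (Python) =====
-- def solution(spell, dic):
--     candidates = dic
--     for c in spell:
--         candidates = [w for w in candidates if c in w]
--     return 1 if candidates else 2
-- ===== Notes on version B (the rewrite author's own statement) =====
-- stated objective: alternative
-- what changed: Inverted the loop nesting: instead of counting per word which spell strings it contains, B keeps a shrinking candidate list of words and filters it once per spell string, returning 1 iff candidates remain.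
import Mathlib
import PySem

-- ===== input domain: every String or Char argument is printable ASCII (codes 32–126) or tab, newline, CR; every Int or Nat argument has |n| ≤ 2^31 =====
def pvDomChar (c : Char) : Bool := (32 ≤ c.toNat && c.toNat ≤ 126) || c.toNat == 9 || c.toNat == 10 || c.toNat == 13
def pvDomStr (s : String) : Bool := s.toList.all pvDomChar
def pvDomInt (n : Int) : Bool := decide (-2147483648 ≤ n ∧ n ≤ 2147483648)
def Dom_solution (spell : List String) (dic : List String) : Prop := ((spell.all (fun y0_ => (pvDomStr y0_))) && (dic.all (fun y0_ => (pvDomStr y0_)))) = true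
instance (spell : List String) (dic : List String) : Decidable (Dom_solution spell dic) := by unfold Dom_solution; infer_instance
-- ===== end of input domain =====

-- B inverts the loop nesting: it filters a shrinking candidate list of dictionary
-- words by each spell string, instead of counting matches per word (alternative).


-- ===== PORT A =====
-- state = (answer, count); count is reset to 0 after each word, as in A
def solution (spell : List String) (dic : List String) : Int :=
  let st :=
    dic.foldl (fun (st : Int × Int) i =>
      let count := spell.foldl (fun c j => if PySem.Str.isIn j i then c + 1 else c) st.2
      let answer := if count = (spell.length : Int) then 1 else st.1
      (answer, 0)) (2, 0)
  st.1

-- ===== PORT B =====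
def solution_alt (spell : List String) (dic : List String) : Int :=
  let candidates := spell.foldl (fun cands c => cands.filter (fun w => PySem.Str.isIn c w)) dic
  if candidates ≠ [] then 1 else 2

-- ===== PRECONDITION & SPEC =====
def Spec_solution (spell : List String) (dic : List String) (out : Int) : Prop := out = solution_alt spell dic
instance (spell : List String) (dic : List String) (out : Int) : Decidable (Spec_solution spell dic out) := by unfold Spec_solution; infer_instance

-- ===== CLAIM =====
def Claim_equal_solution : Prop := ∀ (spell : List String) (dic : List String), Dom_solution spell dic → Spec_solution spell dic (solution spell dic)

-- ===== LEMMAS AND PROOFS =====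

-- the inner count of A equals len(spell) iff every spell string is in the word
lemma count_eq_len_iff (spell : List String) (i : String) :
    (spell.foldl (fun c j => if PySem.Str.isIn j i then c + 1 else c) (0 : Int)
      = (spell.length : Int)) ↔ ∀ j ∈ spell, PySem.Str.isIn j i = true := by
  rw [PySem.List.foldl_if_add_one, zero_add]
  have h := List.countP_le_length (l := spell) (p := fun j => PySem.Str.isIn j i)
  constructor
  · intro he j hj
    have : spell.countP (fun j => PySem.Str.isIn j i) = spell.length := by exact_mod_cast he
    have := (List.countP_eq_length).1 this j hj
    simpa using this
  · intro hall
    have : spell.countP (fun j => PySem.Str.isIn j i) = spell.length :=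
      List.countP_eq_length.2 (by intro j hj; simpa using hall j hj)
    exact_mod_cast this

lemma solutionA_char (spell dic : List String) (a : Int) :
    (dic.foldl (fun (st : Int × Int) i =>
      let count := spell.foldl (fun c j => if PySem.Str.isIn j i then c + 1 else c) st.2
      let answer := if count = (spell.length : Int) then 1 else st.1
      (answer, 0)) (a, 0)).1
    = if ∃ w ∈ dic, ∀ j ∈ spell, PySem.Str.isIn j w = true then 1 else a := by
  induction dic generalizing a with
  | nil => simp
  | cons i t ih =>
    simp only [List.foldl_cons]
    rw [ih]
    by_cases hi : ∀ j ∈ spell, PySem.Str.isIn j i = true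
    · have : (spell.foldl (fun c j => if PySem.Str.isIn j i then c + 1 else c) (0 : Int))
          = (spell.length : Int) := (count_eq_len_iff spell i).2 hi
      simp only [this]
      have : ∃ w ∈ i :: t, ∀ j ∈ spell, PySem.Str.isIn j w = true := ⟨i, by simp, hi⟩
      rw [if_pos this]
      split_ifs <;> rfl
    · have hne : (spell.foldl (fun c j => if PySem.Str.isIn j i then c + 1 else c) (0 : Int))
          ≠ (spell.length : Int) := fun h => hi ((count_eq_len_iff spell i).1 h)
      simp only [if_neg hne]
      congr 1
      simp only [List.mem_cons, eq_iff_iff]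
      constructor
      · rintro ⟨w, hw, h⟩; exact ⟨w, Or.inr hw, h⟩
      · rintro ⟨w, hw | hw, h⟩
        · exact absurd (hw ▸ h) hi
        · exact ⟨w, hw, h⟩

lemma solutionB_char (spell dic : List String) :
    spell.foldl (fun cands c => cands.filter (fun w => PySem.Str.isIn c w)) dic
    = dic.filter (fun w => spell.all (fun j => PySem.Str.isIn j w)) := by
  induction spell generalizing dic with
  | nil => simp
  | cons c t ih =>
    simp only [List.foldl_cons, ih, List.filter_filter]
    congr 1
    funext w
    simp [List.all_cons, Bool.and_comm]

-- ===== VERDICT =====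
theorem solution_spec : Claim_equal_solution := by
  intro spell dic _
  unfold Spec_solution solution solution_alt
  simp only [solutionA_char, solutionB_char]
  by_cases h : ∃ w ∈ dic, ∀ j ∈ spell, PySem.Str.isIn j w = true
  · rw [if_pos h]
    obtain ⟨w, hw, hall⟩ := h
    have : w ∈ dic.filter (fun w => spell.all (fun j => PySem.Str.isIn j w)) := by
      simp only [List.mem_filter, List.all_eq_true]
      exact ⟨hw, hall⟩
    rw [if_pos (by intro he; rw [he] at this; exact absurd this (List.not_mem_nil))]
  · rw [if_neg h]
    have : dic.filter (fun w => spell.all (fun j => PySem.Str.isIn j w)) = [] := by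
      rw [List.filter_eq_nil_iff]
      intro w hw hcon
      exact h ⟨w, hw, by simpa [List.all_eq_true] using hcon⟩
    rw [this]
    simp
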